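-- pv_equiv track=rewrite | github.com/actfuns/ylq | server/shell/gen_show_id.py | gen_element
-- ===== SOURCE A (Python) =====
-- def gen_element(match, start):
--     if not match: return
--
--     key = match[0]
--     char_list =[]
--     for char in match:
--         char_list.append(ord(char) - ord(key))
--
--     length = len(match)
--     result = []
--     for i in range(start, 10):
--         tmp = [delta + i for delta in char_list if 10 > delta + i >= 0]
--         if len(tmp) < length: continue
--
--         result.append(tmp)
--
--     return result
-- ===== SOURCE B (Python) =====
-- def gen_element(match, start):
--     if not match:
--         return
--     base = ord(match[0])
--     deltas = [ord(c) - base for c in match]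
--     lo = -min(deltas)      # smallest shift keeping every delta + i >= 0
--     hi = 9 - max(deltas)   # largest shift keeping every delta + i <= 9 (hi <= 9 since 0 is a delta)
--     return [[d + i for d in deltas] for i in range(max(start, lo), hi + 1)]
-- ===== Notes on version B (the rewrite author's own statement) =====
-- stated objective: simpler
-- what changed: Instead of filtering each shifted list and testing its length per i, B computes min/max of the deltas once, derives the exact feasible interval of shifts [max(start,-min), 9-max], and maps the unfiltered shift over it.
import Mathlib
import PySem

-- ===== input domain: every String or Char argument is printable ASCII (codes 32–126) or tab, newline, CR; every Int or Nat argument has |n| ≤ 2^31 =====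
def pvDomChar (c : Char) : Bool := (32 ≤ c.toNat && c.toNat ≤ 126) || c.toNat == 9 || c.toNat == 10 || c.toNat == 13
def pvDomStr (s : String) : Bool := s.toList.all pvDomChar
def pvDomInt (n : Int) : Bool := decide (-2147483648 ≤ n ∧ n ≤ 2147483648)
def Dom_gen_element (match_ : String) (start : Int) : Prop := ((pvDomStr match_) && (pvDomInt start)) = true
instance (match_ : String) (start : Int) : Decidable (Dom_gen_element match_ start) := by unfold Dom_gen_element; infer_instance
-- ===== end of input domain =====

-- B replaces A's per-shift filter-and-length-test by a one-pass min/max of the deltas and a direct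
-- feasible shift interval [max(start, -min), 9-max]; objective: simpler (no inner filter, no length test).

-- ===== PORT A =====
def gen_element (match_ : String) (start : Int) : Option (List (List Int)) :=
  match match_.toList with
  | [] => none
  | key :: tl =>
    let char_list := (key :: tl).map (fun c => (c.toNat : Int) - (key.toNat : Int))
    let length := char_list.length
    let result := (PySem.List.pyRange start 10 1).foldl
      (fun result i =>
        let tmp := (char_list.filter (fun d => decide (10 > d + i ∧ d + i ≥ 0))).map (fun d => d + i)
        if tmp.length < length then result else result ++ [tmp]) []
    some result

-- ===== PORT B =====
def gen_element_alt (match_ : String) (start : Int) : Option (List (List Int)) :=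
  match match_.toList with
  | [] => none
  | key :: tl =>
    let deltas := (key :: tl).map (fun c => (c.toNat : Int) - (key.toNat : Int))
    let lo := -((PySem.List.min? deltas (fun x => x)).getD 0)
    let hi := 9 - ((PySem.List.max? deltas (fun x => x)).getD 0)
    some ((PySem.List.pyRange (max start lo) (hi + 1) 1).map (fun i => deltas.map (fun d => d + i)))

-- ===== PRECONDITION & SPEC =====
def Spec_gen_element (match_ : String) (start : Int) (out : Option (List (List Int))) : Prop := out = gen_element_alt match_ start
instance (match_ : String) (start : Int) (out : Option (List (List Int))) : Decidable (Spec_gen_element match_ start out) := by unfold Spec_gen_element; infer_instance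

-- ===== CLAIM (what is proved, stated in full; the proofs are below) =====
def Claim_equal_gen_element : Prop := ∀ (match_ : String) (start : Int), Dom_gen_element match_ start → Spec_gen_element match_ start (gen_element match_ start)

-- ===== LEMMAS AND PROOFS =====

/-- A's loop shape: 'if cond: continue else append g(x)' as filter + map. -/
theorem pv_foldl_if_skip {α β : Type} (g : α → β) (q : α → Prop) [DecidablePred q] :
    ∀ (l : List α) (acc : List β),
      l.foldl (fun r x => if q x then r else r ++ [g x]) acc
        = acc ++ (l.filter (fun x => !decide (q x))).map g := by
  intro l
  induction l with
  | nil => intro acc; simp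
  | cons x xs ih =>
    intro acc
    by_cases hx : q x
    · simp [List.foldl_cons, hx, ih]
    · simp [List.foldl_cons, hx, ih]

/-- Filtering an integer range by membership in [lo, hi] gives a range. -/
theorem pv_filter_pyRange (lo hi : Int) :
    ∀ (n : Nat) (a b : Int), (b - a).toNat = n →
      (PySem.List.pyRange a b 1).filter (fun i => decide (lo ≤ i ∧ i ≤ hi))
        = PySem.List.pyRange (max a lo) (min b (hi + 1)) 1 := by
  intro n
  induction n with
  | zero =>
    intro a b hn
    have hba : b ≤ a := by omega
    rw [PySem.List.pyRange_one_eq_nil hba, PySem.List.pyRange_one_eq_nil (by omega)]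
    rfl
  | succ k ih =>
    intro a b hn
    have hab : a < b := by omega
    rw [PySem.List.pyRange_one_cons hab]
    have ih' := ih (a + 1) b (by omega)
    by_cases h1 : lo ≤ a
    · by_cases h2 : a ≤ hi
      · rw [List.filter_cons_of_pos (by simp [h1, h2]), ih']
        have : max (a + 1) lo = a + 1 := by omega
        rw [this]
        have hmax : max a lo = a := by omega
        rw [hmax]
        conv_rhs => rw [PySem.List.pyRange_one_cons (show a < min b (hi + 1) by omega)]
      · rw [List.filter_cons_of_neg (by simp [h2]), ih']
        rw [PySem.List.pyRange_one_eq_nil (by omega), PySem.List.pyRange_one_eq_nil (by omega)]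
    · rw [List.filter_cons_of_neg (by simp [h1]), ih']
      have : max (a + 1) lo = max a lo := by omega
      rw [this]

-- ===== VERDICT (by name: the statement is the Claim_ definition above) =====
theorem gen_element_spec : Claim_equal_gen_element := by
  unfold Claim_equal_gen_element Spec_gen_element
  intro match_ start _dom
  unfold gen_element gen_element_alt
  cases h : match_.toList with
  | nil => rfl
  | cons key tl =>
    simp only
    set deltas := (key :: tl).map (fun c => (c.toNat : Int) - (key.toNat : Int)) with hdel
    -- extract the min and max of deltas
    obtain ⟨m, hm⟩ : ∃ m, PySem.List.min? deltas (fun x => x) = some m := by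
      cases hmin : PySem.List.min? deltas (fun x => x) with
      | none => exact absurd ((PySem.List.min?_eq_none_iff _ _).mp hmin) (by simp [hdel])
      | some m => exact ⟨m, rfl⟩
    obtain ⟨M, hM⟩ : ∃ M, PySem.List.max? deltas (fun x => x) = some M := by
      cases hmax : PySem.List.max? deltas (fun x => x) with
      | none => exact absurd ((PySem.List.max?_eq_none_iff _ _).mp hmax) (by simp [hdel])
      | some M => exact ⟨M, rfl⟩
    have hmMin : ∀ d ∈ deltas, m ≤ d := fun d hd => PySem.List.min?_isMin hm d hd
    have hMMax : ∀ d ∈ deltas, d ≤ M := fun d hd => PySem.List.max?_isMax hM d hd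
    have h0 : (0 : Int) ∈ deltas := by
      rw [hdel]; exact List.mem_map.mpr ⟨key, List.mem_cons_self .., by simp⟩
    have hm0 : m ≤ 0 := hmMin 0 h0
    have hM0 : 0 ≤ M := hMMax 0 h0
    have hmem : m ∈ deltas := PySem.List.min?_mem hm
    have hMem : M ∈ deltas := PySem.List.max?_mem hM
    rw [hm, hM]
    simp only [Option.getD_some]
    have hfull : ∀ i : Int, -m ≤ i → i ≤ 9 - M →
        deltas.filter (fun d => decide (10 > d + i ∧ d + i ≥ 0)) = deltas := by
      intro i h1 h2
      apply List.filter_eq_self.mpr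
      intro d hd
      have := hmMin d hd
      have := hMMax d hd
      simp only [decide_eq_true_eq]
      omega
    rw [pv_foldl_if_skip
      (fun i => List.map (fun d => d + i) (List.filter (fun d => decide (10 > d + i ∧ d + i ≥ 0)) deltas))
      (fun i => (List.map (fun d => d + i) (List.filter (fun d => decide (10 > d + i ∧ d + i ≥ 0)) deltas)).length <
        deltas.length)]
    have hpred : (fun i : Int =>
        !decide ((List.map (fun d => d + i) (List.filter (fun d => decide (10 > d + i ∧ d + i ≥ 0)) deltas)).length <
          deltas.length))
        = (fun i : Int => decide (-m ≤ i ∧ i ≤ 9 - M)) := by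
      funext i
      by_cases hi : -m ≤ i ∧ i ≤ 9 - M
      · rw [hfull i hi.1 hi.2]
        simp [hi]
      · have hlt : (List.filter (fun d => decide (10 > d + i ∧ d + i ≥ 0)) deltas).length < deltas.length := by
          apply List.length_filter_lt_length_iff_exists.mpr
          rcases (not_and_or.mp hi) with hc | hc
          · exact ⟨m, hmem, by simp; omega⟩
          · exact ⟨M, hMem, by simp; omega⟩
        simp only [List.length_map]
        rw [decide_eq_true hlt]
        simp [hi]
    rw [hpred,
      pv_filter_pyRange (-m) (9 - M) ((10 : Int) - start).toNat start 10 rfl]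
    have hmin10 : min (10 : Int) (9 - M + 1) = 9 - M + 1 := by omega
    rw [hmin10, List.nil_append]
    congr 1
    apply List.map_congr_left
    intro i hi
    have := (PySem.List.mem_pyRange_one.mp hi)
    have h1 : -m ≤ i := le_trans (le_max_right _ _) this.1
    rw [hfull i h1 (by omega)]
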